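-- pv_equiv track=rewrite | github.com/Zia97/MatchingWebsite | MatchingSite/Website/views.py | sortUsersOnHobbies
-- ===== SOURCE A (Python) =====
-- def sortUsersOnHobbies(resultsJson,currresult):
--     usersdict = {}
--     newres = {}
--     counter = 0
--     for user in resultsJson:
--         tempresult = []
--         allDict = user.get('hobUser')
--         usersdict[counter] = user
--
--         for entry in allDict:
--             names = []
--             v = list(entry.values())
--             {names[i]: v[i] for i in range(len(names))}
--             tempresult.append(v[0])
--
--         s = set(currresult).intersection(tempresult)
--
--         newres[counter] = len(s)
--         counter = counter + 1
--
--     testing = sorted(newres.items(), key=lambda x: x[1], reverse=True)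
--
--     mylist = [i[0] for i in testing]
--
--     finallist = []
--
--     for num in mylist:
--         finallist.append(usersdict[num])
--
--     return finallist;
-- ===== SOURCE B (Python) =====
-- def sortUsersOnHobbies(resultsJson, currresult):
--     # Bucket sort by score: group users by their count of distinct shared
--     # hobbies, then emit the buckets from highest score down. Within a
--     # bucket users keep their original order, which is exactly what a
--     # stable descending sort produces.
--     wanted = set(currresult)
--     buckets = {}
--     for user in resultsJson:
--         seen = set()
--         for entry in user.get('hobUser'):
--             h = list(entry.values())[0]
--             if h in wanted:
--                 seen.add(h)
--         buckets.setdefault(len(seen), []).append(user)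
--     out = []
--     for score in sorted(buckets, reverse=True):
--         out.extend(buckets[score])
--     return out
-- ===== Notes on version B (the rewrite author's own statement) =====
-- stated objective: alternative
-- what changed: B replaces A's comparison sort of index-keyed dicts by a bucket sort: it groups users in a dict keyed by their count of distinct shared hobbies (collected via a seen-set instead of A's set intersection) and emits the buckets from highest score down, which reproduces A's stable descending order.
import Mathlib
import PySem

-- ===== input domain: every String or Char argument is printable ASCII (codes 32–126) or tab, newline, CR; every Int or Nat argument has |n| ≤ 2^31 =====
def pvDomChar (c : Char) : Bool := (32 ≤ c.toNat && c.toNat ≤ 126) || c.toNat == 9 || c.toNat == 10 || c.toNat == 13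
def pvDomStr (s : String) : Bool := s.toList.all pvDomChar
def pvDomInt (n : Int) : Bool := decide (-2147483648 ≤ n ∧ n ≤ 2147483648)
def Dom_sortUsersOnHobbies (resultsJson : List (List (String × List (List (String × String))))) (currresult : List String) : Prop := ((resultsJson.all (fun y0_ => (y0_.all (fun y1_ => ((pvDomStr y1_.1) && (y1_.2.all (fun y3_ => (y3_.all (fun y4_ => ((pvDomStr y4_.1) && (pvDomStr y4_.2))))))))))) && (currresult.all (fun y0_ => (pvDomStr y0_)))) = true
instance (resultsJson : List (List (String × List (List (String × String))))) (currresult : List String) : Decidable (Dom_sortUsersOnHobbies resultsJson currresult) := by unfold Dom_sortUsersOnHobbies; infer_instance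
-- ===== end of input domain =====

-- B replaces A's comparison sort of index-keyed dicts by a bucket sort: users are grouped
-- in a dict keyed by their score and the buckets are emitted from highest score down
-- (objective: alternative — a different algorithm of similar cost).

-- ===== PORT A =====
-- literal transliteration of A; the empty dict comprehension '{names[i]: v[i] …}' (names = [])
-- builds a discarded empty dict and is a no-op, so it produces no code here.
-- 'user.get("hobUser")' is ported with default []: Python returns None there and then RAISES in
-- the for loop, excluded by Pre_; likewise 'v[0]' on an empty entry raises, excluded by Pre_.
def sortUsersOnHobbies (resultsJson : List (List (String × List (List (String × String))))) (currresult : List String) : List (List (String × List (List (String × String)))) :=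
  let st := resultsJson.foldl
    (fun (st : PySem.Dict Int (List (String × List (List (String × String)))) × PySem.Dict Int Int × Int) user =>
      let usersdict := st.1
      let newres := st.2.1
      let counter := st.2.2
      let allDict := (PySem.Dict.ofList user).getD "hobUser" []
      let usersdict := usersdict.insert counter user
      let tempresult := allDict.foldl
        (fun acc entry =>
          let v := (PySem.Dict.ofList entry).values
          acc ++ [PySem.List.pyGetD v 0 ""]) []
      let s := PySem.Set.inter (PySem.Set.ofList currresult) tempresult
      let newres := newres.insert counter (s.length : Int)
      (usersdict, newres, counter + 1))
    (PySem.Dict.empty, PySem.Dict.empty, 0)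
  let testing := PySem.List.sorted st.2.1.items (fun x => x.2) true
  let mylist := testing.map (fun i => i.1)
  mylist.foldl (fun acc num => acc ++ [st.1.getD num []]) []

-- ===== PORT B =====
-- B-side helper: the inner loop of Source B — the set 'seen' of this user's hobby names that
-- lie in 'wanted'; the user's score is its size.
def pvSeen (wanted : PySem.Set String) (user : List (String × List (List (String × String)))) : PySem.Set String :=
  ((PySem.Dict.ofList user).getD "hobUser" []).foldl
    (fun seen entry =>
      let h := PySem.List.pyGetD (PySem.Dict.ofList entry).values 0 ""
      if wanted.contains h then PySem.Set.add seen h else seen)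
    PySem.Set.empty

def sortUsersOnHobbies_alt (resultsJson : List (List (String × List (List (String × String))))) (currresult : List String) : List (List (String × List (List (String × String)))) :=
  let wanted := PySem.Set.ofList currresult
  let buckets := resultsJson.foldl
    (fun (b : PySem.Dict Int (List (List (String × List (List (String × String)))))) user =>
      b.modify ((pvSeen wanted user).length : Int) [] (fun g => g ++ [user]))
    PySem.Dict.empty
  (PySem.List.sorted buckets.keys (fun k => k) true).foldl
    (fun out score => out ++ buckets.getD score []) []

-- ===== PRECONDITION & SPEC =====
-- Pre_ excludes exactly the inputs where Python A raises: a user without key 'hobUser'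
-- (user.get returns None, the for loop raises TypeError) and an empty hobby entry (v[0] raises IndexError).
def Pre_sortUsersOnHobbies (resultsJson : List (List (String × List (List (String × String))))) (currresult : List String) : Prop :=
  ∀ user ∈ resultsJson,
    (PySem.Dict.ofList user).contains "hobUser" = true ∧
    ∀ entry ∈ (PySem.Dict.ofList user).getD "hobUser" [], entry ≠ []
instance (resultsJson : List (List (String × List (List (String × String))))) (currresult : List String) : Decidable (Pre_sortUsersOnHobbies resultsJson currresult) := by unfold Pre_sortUsersOnHobbies; infer_instance

def pvWitness_sortUsersOnHobbies : (List (List (String × List (List (String × String))))) × List String :=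
  ([[("hobUser", [[("name", "chess")]])], [("hobUser", [[("name", "go")]])]], ["chess"])

def Spec_sortUsersOnHobbies (resultsJson : List (List (String × List (List (String × String))))) (currresult : List String) (out : List (List (String × List (List (String × String))))) : Prop := out = sortUsersOnHobbies_alt resultsJson currresult
instance (resultsJson : List (List (String × List (List (String × String))))) (currresult : List String) (out : List (List (String × List (List (String × String))))) : Decidable (Spec_sortUsersOnHobbies resultsJson currresult out) := by unfold Spec_sortUsersOnHobbies; infer_instance

-- ===== CLAIM (what is proved, stated in full; the proofs are below) =====
def Claim_equal_sortUsersOnHobbies : Prop := ∀ (resultsJson : List (List (String × List (List (String × String))))) (currresult : List String), Dom_sortUsersOnHobbies resultsJson currresult → Pre_sortUsersOnHobbies resultsJson currresult → Spec_sortUsersOnHobbies resultsJson currresult (sortUsersOnHobbies resultsJson currresult)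

-- ===== LEMMAS AND PROOFS =====

-- A's per-user score, written as A computes it (set intersection size)
def pvScore (currresult : List String) (user : List (String × List (List (String × String)))) : Int :=
  ((PySem.Set.inter (PySem.Set.ofList currresult)
    (((PySem.Dict.ofList user).getD "hobUser" []).map
      (fun entry => PySem.List.pyGetD (PySem.Dict.ofList entry).values 0 ""))).length : Int)

-- ---------- A-side: A = stable descending sort of resultsJson by pvScore ----------

-- the index-value pairs (c, l[0]), (c+1, l[1]), …
def pvWithIdx {α : Type} (c : Int) : List α → List (Int × α)
  | [] => []
  | x :: xs => (c, x) :: pvWithIdx (c + 1) xs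

theorem pvWithIdx_snd {α : Type} (c : Int) (l : List α) : (pvWithIdx c l).map Prod.snd = l := by
  induction l generalizing c with
  | nil => rfl
  | cons x xs ih => simp [pvWithIdx, ih]

theorem pvWithIdx_key_ge {α : Type} (c : Int) (l : List α) :
    ∀ p ∈ pvWithIdx c l, c ≤ p.1 := by
  induction l generalizing c with
  | nil => intro p hp; cases hp
  | cons x xs ih =>
    intro p hp
    rcases List.mem_cons.mp hp with hp | hp
    · subst hp; simp
    · have := ih (c + 1) p hp; omega

-- lookup in a dict whose items are pvWithIdx c l returns the paired value
theorem pvWithIdx_getD {α : Type} (c : Int) (l : List α) (dflt : α) :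
    ∀ p ∈ pvWithIdx c l, (PySem.Dict.mk (pvWithIdx c l)).getD p.1 dflt = p.2 := by
  induction l generalizing c with
  | nil => intro p hp; cases hp
  | cons x xs ih =>
    intro p hp
    rcases List.mem_cons.mp hp with hp | hp
    · subst hp
      simp [PySem.Dict.getD, PySem.Dict.get?, pvWithIdx, List.find?_cons_of_pos]
    · have hge : c + 1 ≤ p.1 := pvWithIdx_key_ge (c + 1) xs p hp
      have hne : (((c, x).1 == p.1) = false) := by simp; omega
      have hrec := ih (c + 1) p hp
      simp only [PySem.Dict.getD, PySem.Dict.get?] at hrec ⊢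
      rw [show pvWithIdx c (x :: xs) = (c, x) :: pvWithIdx (c + 1) xs from rfl]
      simpa [List.find?_cons, hne] using hrec

-- inserting a key strictly larger than every existing key appends
theorem pvInsert_fresh {ν : Type} (d : PySem.Dict Int ν) (c : Int) (v : ν)
    (h : ∀ p ∈ d.items, p.1 < c) : d.insert c v = PySem.Dict.mk (d.items ++ [(c, v)]) := by
  have hc : d.contains c = false := by
    simp only [PySem.Dict.contains, List.any_eq_false]
    intro p hp
    have := h p hp
    simp; omega
  simp [PySem.Dict.insert, hc]

-- characterisation of A's main fold
theorem pvFoldA (currresult : List String)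
    (l : List (List (String × List (List (String × String))))) :
    ∀ (c : Int) (d1 : PySem.Dict Int (List (String × List (List (String × String)))))
      (d2 : PySem.Dict Int Int),
      (∀ p ∈ d1.items, p.1 < c) → (∀ p ∈ d2.items, p.1 < c) →
      l.foldl
        (fun (st : PySem.Dict Int (List (String × List (List (String × String)))) × PySem.Dict Int Int × Int) user =>
          let usersdict := st.1
          let newres := st.2.1
          let counter := st.2.2
          let allDict := (PySem.Dict.ofList user).getD "hobUser" []
          let usersdict := usersdict.insert counter user
          let tempresult := allDict.foldl
            (fun acc entry =>
              let v := (PySem.Dict.ofList entry).values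
              acc ++ [PySem.List.pyGetD v 0 ""]) []
          let s := PySem.Set.inter (PySem.Set.ofList currresult) tempresult
          let newres := newres.insert counter (s.length : Int)
          (usersdict, newres, counter + 1))
        (d1, d2, c)
      = (PySem.Dict.mk (d1.items ++ pvWithIdx c l),
         PySem.Dict.mk (d2.items ++ (pvWithIdx c l).map (fun p => (p.1, pvScore currresult p.2))),
         c + l.length) := by
  induction l with
  | nil =>
    intro c d1 d2 h1 h2
    simp [pvWithIdx]
  | cons user rest ih =>
    intro c d1 d2 h1 h2
    rw [List.foldl_cons]
    have htemp :
        (((PySem.Dict.ofList user).getD "hobUser" []).foldl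
          (fun acc entry =>
            let v := (PySem.Dict.ofList entry).values
            acc ++ [PySem.List.pyGetD v 0 ""]) []) =
        ((PySem.Dict.ofList user).getD "hobUser" []).map
          (fun entry => PySem.List.pyGetD (PySem.Dict.ofList entry).values 0 "") := by
      simpa using PySem.List.foldl_append_singleton_eq_map
        (l := (PySem.Dict.ofList user).getD "hobUser" [])
        (f := fun entry => PySem.List.pyGetD (PySem.Dict.ofList entry).values 0 "") (acc := [])
    have e1 : d1.insert c user = PySem.Dict.mk (d1.items ++ [(c, user)]) := pvInsert_fresh d1 c user h1
    have e2 : d2.insert c (((PySem.Set.inter (PySem.Set.ofList currresult)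
          (((PySem.Dict.ofList user).getD "hobUser" []).foldl
            (fun acc entry =>
              let v := (PySem.Dict.ofList entry).values
              acc ++ [PySem.List.pyGetD v 0 ""]) [])).length : Int))
        = PySem.Dict.mk (d2.items ++ [(c, pvScore currresult user)]) := by
      rw [pvInsert_fresh d2 c _ h2, htemp]; rfl
    simp only [e1, e2]
    rw [ih (c + 1) _ _
      (by intro p hp; simp at hp; rcases hp with hp | hp
          · have := h1 p hp; omega
          · subst hp; simp)
      (by intro p hp; simp at hp; rcases hp with hp | hp
          · have := h2 p hp; omega
          · subst hp; simp)]
    simp [pvWithIdx]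
    omega

-- a stable descending sort commutes with mapping, when the key factors through the map
theorem pvInsertBy_map {α β κ : Type} [LT κ] [DecidableLT κ] (g : α → β) (key : β → κ)
    (x : α) (ys : List α) :
    PySem.List.insertBy (fun a b => decide (key b < key a)) (g x) (ys.map g) =
      (PySem.List.insertBy (fun a b => decide (key (g b) < key (g a))) x ys).map g := by
  induction ys with
  | nil => rfl
  | cons y ys ih =>
    simp only [List.map_cons, PySem.List.insertBy]
    by_cases h : key (g y) < key (g x) <;> simp [h, ih]

theorem pvSortedRevMap {α β κ : Type} [LT κ] [DecidableLT κ] (g : α → β) (key : β → κ)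
    (l : List α) :
    PySem.List.sorted (l.map g) key true =
      (PySem.List.sorted l (fun x => key (g x)) true).map g := by
  rw [PySem.List.sorted_rev_eq_foldl_insertBy, PySem.List.sorted_rev_eq_foldl_insertBy,
    List.foldl_map]
  suffices h : ∀ acc : List α,
      l.foldl (fun acc x => PySem.List.insertBy (fun a b => decide (key b < key a)) (g x) acc)
        (acc.map g)
      = (l.foldl (fun acc x =>
          PySem.List.insertBy (fun a b => decide (key (g b) < key (g a))) x acc) acc).map g by
    simpa using h []
  induction l with
  | nil => intro acc; rfl
  | cons x xs ih =>
    intro acc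
    simp only [List.foldl_cons]
    rw [pvInsertBy_map g key x acc, ih]

-- A's return value IS the stable descending sort of resultsJson by pvScore
theorem pvA_eq_sorted (resultsJson : List (List (String × List (List (String × String)))))
    (currresult : List String) :
    sortUsersOnHobbies resultsJson currresult =
      PySem.List.sorted resultsJson (pvScore currresult) true := by
  unfold sortUsersOnHobbies
  rw [pvFoldA currresult resultsJson 0 PySem.Dict.empty PySem.Dict.empty
    (by intro p hp; cases hp) (by intro p hp; cases hp)]
  simp only [PySem.Dict.empty, List.nil_append]
  rw [PySem.List.foldl_append_singleton_eq_map
    (f := fun num => (PySem.Dict.mk (pvWithIdx 0 resultsJson)).getD num [])]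
  rw [pvSortedRevMap (fun p : Int × (List (String × List (List (String × String)))) =>
        (p.1, pvScore currresult p.2)) (fun p => p.2) (pvWithIdx 0 resultsJson)]
  conv_rhs => rw [← pvWithIdx_snd 0 resultsJson]
  rw [pvSortedRevMap (Prod.snd) (pvScore currresult) (pvWithIdx 0 resultsJson)]
  simp only [List.map_map, List.nil_append]
  apply List.map_congr_left
  intro p hp
  have hmem : p ∈ pvWithIdx 0 resultsJson :=
    (PySem.List.sorted_perm (xs := pvWithIdx 0 resultsJson)
      (key := fun p => pvScore currresult p.2) (rev := true)).mem_iff.mp hp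
  simpa using pvWithIdx_getD 0 resultsJson [] p hmem

-- ---------- the bucket lemma: stable descending sort = buckets in descending key order ----------

theorem pvFlatMap_congr {α β : Type} {l : List α} {f g : α → List β}
    (h : ∀ a ∈ l, f a = g a) : l.flatMap f = l.flatMap g := by
  induction l with
  | nil => rfl
  | cons x xs ih =>
    simp only [List.flatMap_cons]
    rw [h x (List.mem_cons_self), ih (fun a ha => h a (List.mem_cons_of_mem _ ha))]

theorem pvInsertBy_append_not_before {α : Type} (before : α → α → Bool) (x : α)
    (pre post : List α) (h : ∀ y ∈ pre, before x y = false) :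
    PySem.List.insertBy before x (pre ++ post) = pre ++ PySem.List.insertBy before x post := by
  induction pre with
  | nil => rfl
  | cons y ys ih =>
    simp only [List.cons_append, PySem.List.insertBy, h y (List.mem_cons_self)]
    simp [ih (fun z hz => h z (List.mem_cons_of_mem _ hz))]

theorem pvInsertBy_cons_of_head {α : Type} (before : α → α → Bool) (x : α) (ys : List α)
    (h : ∀ y ∈ ys, before x y = true) :
    PySem.List.insertBy before x ys = x :: ys := by
  cases ys with
  | nil => rfl
  | cons y t => simp [PySem.List.insertBy, h y (List.mem_cons_self)]

-- inserting x into a concatenation of nonempty buckets with strictly descending keys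
theorem pvInsFlat {α : Type} (key : α → Int) (x : α) (K : List Int) (F : Int → List α)
    (hne : ∀ k ∈ K, F k ≠ [])
    (hkey : ∀ k ∈ K, ∀ y ∈ F k, key y = k)
    (hs : K.Pairwise (fun a b => b < a)) :
    PySem.List.insertBy (fun a b => decide (key b < key a)) x (K.flatMap F) =
      if key x ∈ K
      then K.flatMap (fun k => F k ++ if k = key x then [x] else [])
      else (PySem.List.insertBy (fun a b => decide (b < a)) (key x) K).flatMap
           (fun k => if k = key x then [x] else F k) := by
  induction K with
  | nil => simp [PySem.List.insertBy]
  | cons k K ih =>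
    have hsK : K.Pairwise (fun a b => b < a) := (List.pairwise_cons.mp hs).2
    have hlt : ∀ k' ∈ K, k' < k := (List.pairwise_cons.mp hs).1
    have hFk : ∀ y ∈ F k, key y = k := hkey k (List.mem_cons_self)
    obtain ⟨y0, ys, hy0⟩ := List.exists_cons_of_ne_nil (hne k (List.mem_cons_self))
    simp only [List.flatMap_cons]
    rcases lt_trichotomy k (key x) with hc | hc | hc
    · -- k < key x : x goes in front of everything
      have hmem : key x ∉ k :: K := by
        intro hm
        rcases List.mem_cons.mp hm with hm | hm
        · omega
        · have := hlt _ hm; omega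
      have hhead : PySem.List.insertBy (fun a b => decide (key b < key a)) x (F k ++ K.flatMap F)
          = x :: (F k ++ K.flatMap F) := by
        rw [hy0]
        have : key y0 = k := hFk y0 (by rw [hy0]; exact List.mem_cons_self)
        simp [PySem.List.insertBy, this, hc]
      rw [hhead, if_neg hmem]
      have hik : PySem.List.insertBy (fun a b => decide (b < a)) (key x) (k :: K)
          = key x :: k :: K := by simp [PySem.List.insertBy, hc]
      rw [hik]
      have h1 : (if k = key x then [x] else F k) = F k := by
        have : k ≠ key x := by omega
        simp [this]
      have h2 : K.flatMap (fun k' => if k' = key x then [x] else F k') = K.flatMap F :=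
        pvFlatMap_congr (fun k' hk' => by
          have : k' ≠ key x := by have := hlt _ hk'; omega
          simp [this])
      simp [h1, h2]
    · -- k = key x : x goes to the end of bucket k
      have hmem : key x ∈ k :: K := by rw [← hc]; exact List.mem_cons_self
      rw [if_pos hmem]
      have hpre : ∀ y ∈ F k, (fun a b => decide (key b < key a)) x y = false := by
        intro y hy
        have := hFk y hy
        simp [this, hc]
      rw [pvInsertBy_append_not_before _ _ _ _ hpre]
      have hrest : PySem.List.insertBy (fun a b => decide (key b < key a)) x (K.flatMap F)
          = x :: K.flatMap F := by
        apply pvInsertBy_cons_of_head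
        intro y hy
        obtain ⟨k', hk', hyk'⟩ := List.mem_flatMap.mp hy
        have := hkey k' (List.mem_cons_of_mem _ hk') y hyk'
        have := hlt _ hk'
        simp; omega
      rw [hrest]
      have h1 : (if k = key x then [x] else ([] : List α)) = [x] := by simp [← hc]
      have h2 : K.flatMap (fun k' => F k' ++ if k' = key x then [x] else []) = K.flatMap F :=
        pvFlatMap_congr (fun k' hk' => by
          have : k' ≠ key x := by have := hlt _ hk'; omega
          simp [this])
      rw [h1, h2]
      simp
    · -- key x < k : bucket k stays in front, recurse
      have hpre : ∀ y ∈ F k, (fun a b => decide (key b < key a)) x y = false := by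
        intro y hy
        have := hFk y hy
        simp; omega
      rw [pvInsertBy_append_not_before _ _ _ _ hpre]
      rw [ih (fun k' hk' => hne k' (List.mem_cons_of_mem _ hk'))
          (fun k' hk' => hkey k' (List.mem_cons_of_mem _ hk')) hsK]
      have hkx : key x ∉ ([k] : List Int) := by simp; omega
      have hik : PySem.List.insertBy (fun a b => decide (b < a)) (key x) (k :: K)
          = k :: PySem.List.insertBy (fun a b => decide (b < a)) (key x) K := by
        have hb : decide (k < key x) = false := by simp; omega
        simp [PySem.List.insertBy, hb]
      by_cases hm : key x ∈ K
      · have : key x ∈ k :: K := List.mem_cons_of_mem _ hm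
        rw [if_pos hm, if_pos this]
        have h0 : (if k = key x then [x] else ([] : List α)) = [] := by
          have : k ≠ key x := by omega
          simp [this]
        simp [h0]
      · have hnm : key x ∉ k :: K := by
          intro h; rcases List.mem_cons.mp h with h | h
          · omega
          · exact hm h
        rw [if_neg hm, if_neg hnm, hik]
        simp only [List.flatMap_cons]
        have : (if k = key x then [x] else F k) = F k := by
          have : k ≠ key x := by omega
          simp [this]
        rw [this]

-- the main bucket lemma
theorem pvSortedRevBuckets {α : Type} (key : α → Int) (l : List α) :
    PySem.List.sorted l key true =
      (PySem.List.sorted (PySem.Set.ofList (l.map key)) (fun k => k) true).flatMap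
        (fun k => l.filter (fun x => key x == k)) := by
  induction l using List.reverseRecOn with
  | nil => rfl
  | append_singleton t x ih =>
    have hK := PySem.List.sorted_perm (xs := PySem.Set.ofList (t.map key)) (key := fun k : Int => k) (rev := true)
    set K := PySem.List.sorted (PySem.Set.ofList (t.map key)) (fun k => k) true with hKdef
    have hKnodup : K.Nodup := hK.nodup_iff.mpr (PySem.Set.nodup_ofList _)
    have hKge : K.Pairwise (fun a b : Int => b ≤ a) :=
      PySem.List.sorted_pairwise_rev (PySem.Set.ofList (t.map key)) (fun k => k)
    have hKgt : K.Pairwise (fun a b : Int => b < a) := by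
      have := hKnodup.and hKge
      exact this.imp (fun {a b} h => lt_of_le_of_ne h.2 (Ne.symm h.1))
    have hLHS : PySem.List.sorted (t ++ [x]) key true
        = PySem.List.insertBy (fun a b => decide (key b < key a)) x (PySem.List.sorted t key true) := by
      rw [PySem.List.sorted_rev_eq_foldl_insertBy, List.foldl_append,
        ← PySem.List.sorted_rev_eq_foldl_insertBy]
      rfl
    rw [hLHS, ih]
    rw [pvInsFlat key x K (fun k => t.filter (fun y => key y == k))
      (by
        intro k hk
        have : k ∈ t.map key := by
          have := (PySem.List.mem_sorted _ _ _ k).mp hk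
          exact (PySem.Set.mem_ofList _ _).mp this
        obtain ⟨y, hy, hyk⟩ := List.mem_map.mp this
        exact List.ne_nil_of_mem (List.mem_filter.mpr ⟨hy, by simp [hyk]⟩))
      (by
        intro k _ y hy
        simpa using (List.mem_filter.mp hy).2)
      hKgt]
    have hmapapp : (t ++ [x]).map key = t.map key ++ [key x] := by simp
    by_cases hm : key x ∈ K
    · -- key already present: buckets keep their keys, bucket (key x) gains x at its end
      have hmS : key x ∈ PySem.Set.ofList (t.map key) := (PySem.List.mem_sorted _ _ _ _).mp hm
      have hRK : PySem.Set.ofList ((t ++ [x]).map key) = PySem.Set.ofList (t.map key) := by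
        rw [hmapapp, PySem.Set.ofList_append_singleton, PySem.Set.add_of_mem hmS]
      rw [if_pos hm, hRK, ← hKdef]
      apply pvFlatMap_congr
      intro k _
      rw [List.filter_append]
      congr 1
      by_cases hkx : k = key x
      · simp [hkx]
      · have : ¬ (key x == k) = true := by simp [Ne.symm hkx]
        simp [hkx, this]
    · -- new key: it is inserted into the descending key list, with bucket [x]
      have hmS : key x ∉ PySem.Set.ofList (t.map key) := fun h =>
        hm ((PySem.List.mem_sorted _ _ _ _).mpr h)
      have hxnotin : key x ∉ t.map key := fun h => hmS ((PySem.Set.mem_ofList _ _).mpr h)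
      have hRK : PySem.List.sorted (PySem.Set.ofList ((t ++ [x]).map key)) (fun k => k) true
          = PySem.List.insertBy (fun a b => decide (b < a)) (key x) K := by
        rw [hmapapp, PySem.Set.ofList_append_singleton, PySem.Set.add_of_not_mem hmS,
          PySem.List.sorted_rev_eq_foldl_insertBy, List.foldl_append,
          ← PySem.List.sorted_rev_eq_foldl_insertBy, ← hKdef]
        rfl
      rw [if_neg hm, hRK]
      apply pvFlatMap_congr
      intro k hk
      rcases (PySem.List.mem_insertBy _ _ _ _).mp hk with hk | hk
      · subst hk
        have hfilt : t.filter (fun y => key y == key x) = [] := by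
          rw [List.filter_eq_nil_iff]
          intro y hy hby
          exact hxnotin (List.mem_map.mpr ⟨y, hy, by simpa using hby⟩)
        rw [if_pos rfl, List.filter_append, hfilt]
        simp
      · have hkne : k ≠ key x := by
          intro h; subst h; exact hm hk
        rw [if_neg hkne, List.filter_append]
        have : ¬ (key x == k) = true := by simp [Ne.symm hkne]
        simp [this]

-- ---------- B-side characterisation ----------

-- membership in the conditional seen-set fold
theorem pvCondFold_mem (w : PySem.Set String) (names : List String) (s0 : PySem.Set String) (y : String) :
    y ∈ names.foldl (fun s h => if w.contains h then PySem.Set.add s h else s) s0 ↔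
      y ∈ s0 ∨ (y ∈ names ∧ y ∈ w) := by
  induction names generalizing s0 with
  | nil => simp
  | cons h t ih =>
    simp only [List.foldl_cons]
    by_cases hw : w.contains h
    · rw [if_pos hw, ih]
      rw [PySem.Set.mem_add]
      constructor
      · rintro (⟨hs | rfl⟩ | ⟨ht, hyw⟩)
        · exact Or.inl hs
        · exact Or.inr ⟨List.mem_cons_self, (PySem.Set.contains_iff _ _).mp hw⟩
        · exact Or.inr ⟨List.mem_cons_of_mem _ ht, hyw⟩
      · rintro (hs | ⟨hyt, hyw⟩)
        · exact Or.inl (Or.inl hs)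
        · rcases List.mem_cons.mp hyt with rfl | hyt
          · exact Or.inl (Or.inr rfl)
          · exact Or.inr ⟨hyt, hyw⟩
    · rw [if_neg hw, ih]
      constructor
      · rintro (hs | ⟨hyt, hyw⟩)
        · exact Or.inl hs
        · exact Or.inr ⟨List.mem_cons_of_mem _ hyt, hyw⟩
      · rintro (hs | ⟨hyt, hyw⟩)
        · exact Or.inl hs
        · rcases List.mem_cons.mp hyt with rfl | hyt
          · exact absurd ((PySem.Set.contains_iff w y).mpr hyw) (by simpa using hw)
          · exact Or.inr ⟨hyt, hyw⟩

theorem pvCondFold_nodup (w : PySem.Set String) (names : List String) (s0 : PySem.Set String)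
    (h : s0.Nodup) :
    (names.foldl (fun s h => if w.contains h then PySem.Set.add s h else s) s0).Nodup := by
  induction names generalizing s0 with
  | nil => exact h
  | cons a t ih =>
    simp only [List.foldl_cons]
    by_cases hw : w.contains a
    · rw [if_pos hw]; exact ih _ (PySem.Set.nodup_add _ _ h)
    · rw [if_neg hw]; exact ih _ h

-- B's seen-set has the same size as A's intersection
theorem pvScore_eq_seen (currresult : List String)
    (user : List (String × List (List (String × String)))) :
    pvScore currresult user = ((pvSeen (PySem.Set.ofList currresult) user).length : Int) := by
  unfold pvScore pvSeen
  rw [show (((PySem.Dict.ofList user).getD "hobUser" []).foldl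
      (fun seen entry =>
        let h := PySem.List.pyGetD (PySem.Dict.ofList entry).values 0 ""
        if (PySem.Set.ofList currresult).contains h then PySem.Set.add seen h else seen)
      PySem.Set.empty)
    = ((((PySem.Dict.ofList user).getD "hobUser" []).map
        (fun entry => PySem.List.pyGetD (PySem.Dict.ofList entry).values 0 "")).foldl
      (fun s h => if (PySem.Set.ofList currresult).contains h then PySem.Set.add s h else s)
      PySem.Set.empty) from by rw [List.foldl_map]]
  set names := (((PySem.Dict.ofList user).getD "hobUser" []).map
      (fun entry => PySem.List.pyGetD (PySem.Dict.ofList entry).values 0 ""))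
  have hnodup1 : (PySem.Set.inter (PySem.Set.ofList currresult) names).Nodup :=
    PySem.Set.nodup_inter _ _ (PySem.Set.nodup_ofList _)
  have hnodup2 : (names.foldl (fun s h =>
      if (PySem.Set.ofList currresult).contains h then PySem.Set.add s h else s)
      PySem.Set.empty).Nodup := pvCondFold_nodup _ _ _ (by simp [PySem.Set.empty])
  have hperm : (PySem.Set.inter (PySem.Set.ofList currresult) names).Perm
      (names.foldl (fun s h =>
        if (PySem.Set.ofList currresult).contains h then PySem.Set.add s h else s)
        PySem.Set.empty) := by
    rw [List.perm_ext_iff_of_nodup hnodup1 hnodup2]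
    intro y
    rw [PySem.Set.mem_inter, PySem.Set.mem_ofList, pvCondFold_mem]
    simp [PySem.Set.empty, and_comm]
  rw [hperm.length_eq]

-- B's return value IS the flatMap of score buckets over the descending distinct scores
theorem pvB_eq_buckets (resultsJson : List (List (String × List (List (String × String)))))
    (currresult : List String) :
    sortUsersOnHobbies_alt resultsJson currresult =
      (PySem.List.sorted
        (PySem.Set.ofList (resultsJson.map (fun u => ((pvSeen (PySem.Set.ofList currresult) u).length : Int))))
        (fun k => k) true).flatMap
        (fun k => resultsJson.filter
          (fun u => ((pvSeen (PySem.Set.ofList currresult) u).length : Int) == k)) := by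
  unfold sortUsersOnHobbies_alt
  simp only
  set key := fun u : List (String × List (List (String × String))) =>
    ((pvSeen (PySem.Set.ofList currresult) u).length : Int) with hkey
  have hkeys : (resultsJson.foldl
      (fun (b : PySem.Dict Int (List (List (String × List (List (String × String)))))) user =>
        b.modify (key user) [] (fun g => g ++ [user]))
      PySem.Dict.empty).keys = PySem.Set.ofList (resultsJson.map key) := by
    rw [PySem.Dict.keys_foldl_modify_key resultsJson key [] (fun _ u => fun g => g ++ [u])
      PySem.Dict.empty]
    simp [PySem.Dict.keys, PySem.Dict.empty, PySem.Set.update_nil_left]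
  have hgetD : ∀ c : Int, (resultsJson.foldl
      (fun (b : PySem.Dict Int (List (List (String × List (List (String × String)))))) user =>
        b.modify (key user) [] (fun g => g ++ [user]))
      PySem.Dict.empty).getD c [] = resultsJson.filter (fun u => key u == c) := by
    intro c
    rw [show (resultsJson.foldl
        (fun (b : PySem.Dict Int (List (List (String × List (List (String × String)))))) user =>
          b.modify (key user) [] (fun g => g ++ [user]))
        PySem.Dict.empty)
      = ((resultsJson.map (fun u => (key u, u))).foldl
          (fun b p => b.modify p.1 [] (fun g => g ++ [p.2])) PySem.Dict.empty)
      from by rw [List.foldl_map]]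
    rw [PySem.Dict.getD_foldl_modify_append]
    rw [List.filter_map]
    simp [Function.comp_def, PySem.Dict.getD, PySem.Dict.get?, PySem.Dict.empty]
  rw [hkeys]
  rw [PySem.List.foldl_append_eq_flatMap]
  rw [List.nil_append]
  exact pvFlatMap_congr (fun k _ => hgetD k)

-- ===== VERDICT (by name: the statement is the Claim_ definition above) =====
theorem sortUsersOnHobbies_spec : Claim_equal_sortUsersOnHobbies := by
  intro resultsJson currresult _ _
  unfold Spec_sortUsersOnHobbies
  rw [pvA_eq_sorted, pvB_eq_buckets]
  have hfun : pvScore currresult = fun u =>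
      ((pvSeen (PySem.Set.ofList currresult) u).length : Int) := by
    funext u; exact pvScore_eq_seen currresult u
  rw [hfun]
  exact pvSortedRevBuckets _ resultsJson
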